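-- pv_equiv track=rewrite | github.com/surajn222/data-structures | strings/strings_questions/rearrange/decode_a_given_sequence_to_construct_a_minimum_number_without_repeated_digits.py | decode
-- ===== SOURCE A (Python) =====
-- from collections import deque
--
-- def decode(seq):
-- 	# base case
-- 	if not seq or not len(seq):
-- 		return seq
--
-- 	# `result` store the output string
-- 	result = ''
--
-- 	# create an empty stack of integers
-- 	stack = deque()
--
-- 	# run `n+1` times, where `n` is the length of the input sequence
-- 	for i in range(len(seq) + 1):
--
-- 		# push number `i+1` into the stack
-- 		stack.append(i + 1)
--
-- 		# if all characters of the input sequence are processed, or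
-- 		# the current character is 'I' (increasing)
-- 		if i == len(seq) or seq[i] == 'I':
-- 			# run till stack is empty
-- 			while stack:
-- 				# remove a top element from the stack and add it to the solution
-- 				result += str(stack.pop())
--
-- 	return result
-- ===== SOURCE B (Python) =====
-- def decode(seq):
--     # Stack-free rewrite: the stack A builds between flushes is always the run
--     # start+1 .. i+1, so emit that descending range directly in one pass.
--     if not seq:
--         return seq
--     out = []
--     start = 0
--     for i, c in enumerate(seq):
--         if c == 'I':
--             out.extend(range(i + 1, start, -1))
--             start = i + 1
--     out.extend(range(len(seq) + 1, start, -1))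
--     return ''.join(map(str, out))
-- ===== Notes on version B (the rewrite author's own statement) =====
-- stated objective: simpler
-- what changed: A pushes every index onto a deque and pops it digit block by digit block; B keeps no stack at all: it remembers only the start of the current descending run and, at each increase marker and at the end, emits the flushed block directly as the closed-form descending range(i+1, start, -1), joining once at the end.
import Mathlib
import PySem

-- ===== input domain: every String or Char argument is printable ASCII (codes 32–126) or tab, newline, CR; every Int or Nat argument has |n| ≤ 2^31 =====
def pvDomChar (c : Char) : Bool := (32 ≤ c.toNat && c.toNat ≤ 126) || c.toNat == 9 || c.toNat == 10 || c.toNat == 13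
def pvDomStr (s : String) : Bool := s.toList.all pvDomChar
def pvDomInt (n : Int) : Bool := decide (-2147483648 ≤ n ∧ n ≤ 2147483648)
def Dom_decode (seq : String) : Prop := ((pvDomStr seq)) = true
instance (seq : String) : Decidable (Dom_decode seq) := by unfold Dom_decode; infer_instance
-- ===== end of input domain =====

-- B replaces A's push/pop stack by a single pass that emits each flushed block as a
-- closed-form descending range (objective: simpler — no stack state).

-- ===== PORT A =====
-- Strings are accumulated on the List Char side (PySem convention; String.ofList at the
-- end). The deque used as a stack is a List Int with head = top (append pushes the new
-- top, pop takes it).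
def decodeDrain : List Int → List Char → List Char
  | [], res => res
  | t :: rest, res => decodeDrain rest (res ++ PySem.Int.toChars t)

-- one iteration of A's `for i in range(len(seq) + 1)` loop; state = (result, stack)
def decodeStep (s : List Char) (n : Int) (st : List Char × List Int) (i : Int) :
    List Char × List Int :=
  let stack := (i + 1) :: st.2
  if i = n ∨ PySem.List.pyGet? s i = some 'I' then (decodeDrain stack st.1, [])
  else (st.1, stack)

def decode (seq : String) : String :=
  if PySem.Str.len seq = 0 then seq
  else
    String.ofList
      ((PySem.List.pyRange 0 ((seq.toList.length : Int) + 1) 1).foldl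
        (decodeStep seq.toList (seq.toList.length : Int)) ([], [])).1

-- ===== PORT B =====
-- one iteration of B's `for i, c in enumerate(seq)` loop; state = (out, start)
def decodeAltStep (st : List Int × Int) (p : Int × Char) : List Int × Int :=
  if p.2 = 'I' then (st.1 ++ PySem.List.pyRange (p.1 + 1) st.2 (-1), p.1 + 1) else st

-- B's last two lines: `out.extend(range(len(seq)+1, start, -1)); ''.join(map(str, out))`
def decodeAltFinish (n : Int) (acc : List Int × Int) : String :=
  PySem.Str.join "" ((acc.1 ++ PySem.List.pyRange (n + 1) acc.2 (-1)).map PySem.Int.toStr)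

def decode_alt (seq : String) : String :=
  if PySem.Str.len seq = 0 then seq
  else
    decodeAltFinish (seq.toList.length : Int)
      ((PySem.List.enumerate seq.toList 0).foldl decodeAltStep ([], 0))

-- ===== PRECONDITION & SPEC =====
def Spec_decode (seq : String) (out : String) : Prop := out = decode_alt seq
instance (seq : String) (out : String) : Decidable (Spec_decode seq out) := by unfold Spec_decode; infer_instance

-- ===== CLAIM (what is proved, stated in full; the proofs are below) =====
def Claim_equal_decode : Prop := ∀ (seq : String), Dom_decode seq → Spec_decode seq (decode seq)

-- ===== LEMMAS AND PROOFS =====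

theorem decodeDrain_eq (st : List Int) (res : List Char) :
    decodeDrain st res = res ++ (st.map PySem.Int.toChars).flatten := by
  induction st generalizing res with
  | nil => simp [decodeDrain]
  | cons t rest ih => simp [decodeDrain, ih]

theorem join_empty_sep (parts : List (List Char)) :
    PySem.Chars.join [] parts = parts.flatten := by
  induction parts with
  | nil => simp [PySem.Chars.join_nil]
  | cons a rest ih =>
      cases rest with
      | nil => simp [PySem.Chars.join_singleton]
      | cons b r => rw [PySem.Chars.join_cons_cons]; simp_all

theorem join_toStr (l : List Int) :
    PySem.Str.join "" (l.map PySem.Int.toStr)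
      = String.ofList ((l.map PySem.Int.toChars).flatten) := by
  apply String.toList_inj.mp
  rw [PySem.Str.toList_join, String.toList_ofList]
  simp [join_empty_sep, Function.comp_def, PySem.Int.toList_toStr]

-- the main loop invariant: A's (result, stack) against B's (out, start); A's stack
-- always holds the descending run start+1 .. i, i.e. pyRange i start (-1)
theorem loop_eq (s : List Char) (n : Int) (hn : n = (s.length : Int)) :
    ∀ (l pre : List Char), pre ++ l = s → ∀ (start : Int) (out : List Int),
      start ≤ (pre.length : Int) →
      (PySem.List.pyRange (pre.length) ((pre.length : Int) + l.length) 1).foldl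
          (decodeStep s n)
          ((out.map PySem.Int.toChars).flatten, PySem.List.pyRange (pre.length) start (-1))
        = ((((PySem.List.enumerate l (pre.length)).foldl decodeAltStep (out, start)).1.map
              PySem.Int.toChars).flatten,
           PySem.List.pyRange ((pre.length : Int) + l.length)
             ((PySem.List.enumerate l (pre.length)).foldl decodeAltStep (out, start)).2 (-1))
      ∧ ((PySem.List.enumerate l (pre.length)).foldl decodeAltStep (out, start)).2
          ≤ (pre.length : Int) + l.length := by
  intro l
  induction l with
  | nil =>
      intro pre _ start out hstart
      refine ⟨?_, by simpa using hstart⟩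
      simp [PySem.List.enumerate_nil, PySem.List.pyRange_one_eq_nil le_rfl]
  | cons c l ih =>
      intro pre hpre start out hstart
      have hlen1 : (((c :: l).length : Nat) : Int) = (l.length : Int) + 1 := by
        push_cast [List.length_cons]; ring
      rw [hlen1]
      have hi : (pre.length : Int) < (pre.length : Int) + ((l.length : Int) + 1) := by omega
      rw [PySem.List.pyRange_one_cons hi]
      have hne : (pre.length : Int) ≠ n := by
        rw [hn, ← hpre]
        simp only [List.length_append, List.length_cons]
        push_cast; omega
      have hget : PySem.List.pyGet? s (pre.length : Int) = some c := by
        rw [← hpre]; exact PySem.List.pyGet?_append_length pre l c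
      have hpush : PySem.List.pyRange ((pre.length : Int) + 1) start (-1)
          = ((pre.length : Int) + 1) :: PySem.List.pyRange (pre.length) start (-1) := by
        rw [PySem.List.pyRange_neg_one_cons (show start < (pre.length : Int) + 1 by omega)]
        norm_num
      have hpre' : (pre ++ [c]) ++ l = s := by simpa using hpre
      have hlen2 : (((pre ++ [c]).length : Nat) : Int) = (pre.length : Int) + 1 := by
        push_cast [List.length_append, List.length_cons, List.length_nil]; ring
      have harith : (pre.length : Int) + ((l.length : Int) + 1)
          = (pre.length : Int) + 1 + (l.length : Int) := by ring
      simp only [List.foldl_cons, PySem.List.enumerate_cons]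
      by_cases hc : c = 'I'
      · have hstep :
            decodeStep s n ((out.map PySem.Int.toChars).flatten,
                PySem.List.pyRange (pre.length) start (-1)) (pre.length)
              = (((out ++ PySem.List.pyRange ((pre.length : Int) + 1) start (-1)).map
                    PySem.Int.toChars).flatten, ([] : List Int)) := by
          simp only [decodeStep, ← hpush, hget, hc]
          simp [decodeDrain_eq]
        have hB : decodeAltStep (out, start) ((pre.length : Int), c)
            = (out ++ PySem.List.pyRange ((pre.length : Int) + 1) start (-1),
               (pre.length : Int) + 1) := by
          simp [decodeAltStep, hc]
        rw [hstep, hB]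
        have key := ih (pre ++ [c]) hpre' ((pre.length : Int) + 1)
          (out ++ PySem.List.pyRange ((pre.length : Int) + 1) start (-1))
          (by rw [hlen2])
        rw [hlen2] at key
        rw [PySem.List.pyRange_neg_one_eq_nil (le_refl ((pre.length : Int) + 1))] at key
        rw [harith]
        exact key
      · have hstep :
            decodeStep s n ((out.map PySem.Int.toChars).flatten,
                PySem.List.pyRange (pre.length) start (-1)) (pre.length)
              = ((out.map PySem.Int.toChars).flatten,
                 PySem.List.pyRange ((pre.length : Int) + 1) start (-1)) := by
          simp only [decodeStep, ← hpush, hget]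
          rw [if_neg]
          rintro (h | h)
          · exact hne h
          · exact hc (by simpa using h)
        have hB : decodeAltStep (out, start) ((pre.length : Int), c) = (out, start) := by
          simp [decodeAltStep, hc]
        rw [hstep, hB]
        have key := ih (pre ++ [c]) hpre' start out (by rw [hlen2]; omega)
        rw [hlen2] at key
        rw [harith]
        exact key

-- ===== VERDICT (by name: the statement is the Claim_ definition above) =====
theorem decode_spec : Claim_equal_decode := by
  unfold Claim_equal_decode Spec_decode
  intro seq _
  unfold decode decode_alt decodeAltFinish
  by_cases h : PySem.Str.len seq = 0
  · rw [if_pos h, if_pos h]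
  · rw [if_neg h, if_neg h]
    have hL := loop_eq seq.toList ((seq.toList.length : Nat) : Int) rfl seq.toList [] rfl 0 []
      (by simp)
    simp only [List.length_nil, Nat.cast_zero, zero_add, List.map_nil, List.flatten_nil] at hL
    rw [PySem.List.pyRange_neg_one_eq_nil (le_refl (0 : Int))] at hL
    obtain ⟨hfold, hle⟩ := hL
    rw [PySem.List.pyRange_one_succ_right (by positivity), List.foldl_append,
      List.foldl_cons, List.foldl_nil, hfold, join_toStr]
    have hpushn : PySem.List.pyRange ((seq.toList.length : Int) + 1)
          ((PySem.List.enumerate seq.toList 0).foldl decodeAltStep ([], 0)).2 (-1)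
        = ((seq.toList.length : Int) + 1)
            :: PySem.List.pyRange (seq.toList.length : Int)
                ((PySem.List.enumerate seq.toList 0).foldl decodeAltStep ([], 0)).2 (-1) := by
      rw [PySem.List.pyRange_neg_one_cons (by omega)]
      norm_num
    simp only [decodeStep, ← hpushn]
    simp [decodeDrain_eq]
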